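-- pv_equiv track=rewrite | github.com/Keegan-T/TypeRacer-Stats | src/commands/owner/skippedraces.py | group_numbers
-- ===== SOURCE A (Python) =====
-- def group_numbers(numbers, proximity=20):
--     if not numbers:
--         return []
--
--     groups = [[numbers[0]]]
--     for i in range(1, len(numbers)):
--         if numbers[i] <= groups[-1][-1] + proximity:
--             groups[-1].append(numbers[i])
--         else:
--             groups.append([numbers[i]])
--
--     return groups
-- ===== SOURCE B (Python) =====
-- def group_numbers(numbers, proximity=20):
--     # Build the groups back-to-front: walk the list in reverse, growing the
--     # current group in reversed element order (so cur[-1] is that group's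
--     # first element, the current element's right neighbour); flush a finished
--     # group, then put everything back in forward order at the end.
--     groups = []
--     cur = []
--     for x in reversed(numbers):
--         if cur and cur[-1] <= x + proximity:
--             cur.append(x)
--         else:
--             if cur:
--                 groups.append(cur[::-1])
--             cur = [x]
--     if cur:
--         groups.append(cur[::-1])
--     groups.reverse()
--     return groups
-- ===== Notes on version B (the rewrite author's own statement) =====
-- stated objective: alternative
-- what changed: B builds the result back-to-front: it walks the list in reverse, growing the current group in reversed order and deciding a break by comparing each element with the current group's first element (its right neighbour), then reverses groups and group list, instead of A's forward loop appending to the last group by comparing with its last element.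
import Mathlib
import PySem

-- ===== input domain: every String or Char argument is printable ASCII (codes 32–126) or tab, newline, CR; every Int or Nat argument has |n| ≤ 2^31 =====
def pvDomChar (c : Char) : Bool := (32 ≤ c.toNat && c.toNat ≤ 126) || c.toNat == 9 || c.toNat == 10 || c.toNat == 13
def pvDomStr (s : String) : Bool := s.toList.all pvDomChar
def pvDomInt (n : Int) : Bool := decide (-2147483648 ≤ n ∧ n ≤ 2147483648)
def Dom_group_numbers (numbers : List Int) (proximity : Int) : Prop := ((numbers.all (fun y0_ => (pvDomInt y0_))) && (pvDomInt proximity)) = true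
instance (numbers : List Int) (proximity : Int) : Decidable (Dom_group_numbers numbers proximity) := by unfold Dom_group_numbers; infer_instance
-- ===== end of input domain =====

-- B builds the same groups back-to-front over the reversed list; same O(n) cost, different decomposition (objective: alternative).

-- ===== PORT A =====
-- A's loop over i in range(1, len(numbers)) visits the tail elements in order,
-- carrying 'groups'; 'groups[-1][-1]' is groups.getLast!.getLast! (both lists
-- are always nonempty when read, so Python never raises), and the in-place
-- 'groups[-1].append(v)' replaces the last group by (last ++ [v]).
def groupA_loop (proximity : Int) : List Int → List (List Int) → List (List Int)
  | [], groups => groups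
  | v :: rest, groups =>
    if v ≤ groups.getLast!.getLast! + proximity then
      groupA_loop proximity rest (groups.dropLast ++ [groups.getLast! ++ [v]])
    else
      groupA_loop proximity rest (groups ++ [[v]])

def group_numbers (numbers : List Int) (proximity : Int) : List (List Int) :=
  match numbers with
  | [] => []
  | x :: rest => groupA_loop proximity rest [[x]]

-- ===== PORT B =====
-- B's loop body: state (groups, cur); 'cur[-1]' is cur.getLast! (cur nonempty
-- when read), 'cur.append(x)' is cur ++ [x], 'cur[::-1]' is cur.reverse.
def groupB_step (proximity : Int) (st : List (List Int) × List Int) (x : Int) : List (List Int) × List Int :=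
  if st.2 ≠ [] ∧ st.2.getLast! ≤ x + proximity then (st.1, st.2 ++ [x])
  else ((if st.2 ≠ [] then st.1 ++ [st.2.reverse] else st.1), [x])

-- 'for x in reversed(numbers)' = a foldl over numbers.reverse; then the final
-- flush of cur and 'groups.reverse()'.
def group_numbers_alt (numbers : List Int) (proximity : Int) : List (List Int) :=
  let st := numbers.reverse.foldl (groupB_step proximity) ([], [])
  (if st.2 ≠ [] then st.1 ++ [st.2.reverse] else st.1).reverse

-- ===== PRECONDITION & SPEC =====
def Spec_group_numbers (numbers : List Int) (proximity : Int) (out : List (List Int)) : Prop := out = group_numbers_alt numbers proximity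
instance (numbers : List Int) (proximity : Int) (out : List (List Int)) : Decidable (Spec_group_numbers numbers proximity out) := by unfold Spec_group_numbers; infer_instance

-- ===== CLAIM (what is proved, stated in full; the proofs are below) =====
def Claim_equal_group_numbers : Prop := ∀ (numbers : List Int) (proximity : Int), Dom_group_numbers numbers proximity → Spec_group_numbers numbers proximity (group_numbers numbers proximity)

-- ===== LEMMAS AND PROOFS =====

-- Proof-only middle man: the one-pass right fold that both ports compute.
def bstep (proximity : Int) (x : Int) (groups : List (List Int)) : List (List Int) :=
  match groups with
  | [] => [[x]]
  | g :: gs => if g.headD 0 ≤ x + proximity then (x :: g) :: gs else [x] :: g :: gs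

def brun (proximity : Int) (l : List Int) : List (List Int) :=
  l.foldr (bstep proximity) []

-- brun on a nonempty list is nonempty and its first group starts with the head.
theorem brun_head (proximity : Int) (y : Int) (l : List Int) :
    ∃ g t, brun proximity (y :: l) = (y :: g) :: t := by
  show ∃ g t, bstep proximity y (brun proximity l) = (y :: g) :: t
  cases h : brun proximity l with
  | nil => exact ⟨[], [], rfl⟩
  | cons g gs =>
    simp only [bstep]
    split_ifs with hc
    · exact ⟨g, gs, rfl⟩
    · exact ⟨[], g :: gs, rfl⟩

theorem getLast!_concat_gen {a' : Type} [Inhabited a'] (l : List a') (a : a') : (l ++ [a]).getLast! = a := by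
  induction l with
  | nil => simp
  | cons x xs ih => rw [List.cons_append, List.getLast!_cons_eq_getLastD, List.getLastD_concat]

-- ---- A's loop equals brun ----
-- Invariant: running A's loop from state gs ++ [g ++ [a]] (a is the number
-- just placed) over the rest l yields gs, then brun's groups for (a :: l)
-- with the first of those groups prefixed by g.
theorem loopA_eq (proximity : Int) :
    ∀ (l : List Int) (a : Int) (gs : List (List Int)) (g : List Int),
      groupA_loop proximity l (gs ++ [g ++ [a]]) =
        gs ++ (match brun proximity (a :: l) with
               | [] => []
               | h :: t => (g ++ h) :: t) := by
  intro l
  induction l with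
  | nil =>
    intro a gs g
    simp [groupA_loop, brun, bstep]
  | cons y l ih =>
    intro a gs g
    obtain ⟨g', t, hB⟩ := brun_head proximity y l
    have hlast : (gs ++ [g ++ [a]]).getLast!.getLast! = a := by
      rw [getLast!_concat_gen, getLast!_concat_gen]
    have hstep : brun proximity (a :: y :: l)
        = bstep proximity a (brun proximity (y :: l)) := rfl
    unfold groupA_loop
    rw [hlast]
    by_cases hc : y ≤ a + proximity
    · simp only [hc, if_pos]
      rw [show (gs ++ [g ++ [a]]).dropLast ++ [(gs ++ [g ++ [a]]).getLast! ++ [y]]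
            = gs ++ [(g ++ [a]) ++ [y]] by
          rw [getLast!_concat_gen]; simp]
      rw [ih y gs (g ++ [a])]
      rw [hstep, hB]
      simp [bstep, hc]
    · simp only [hc, if_neg, not_false_iff]
      rw [show (gs ++ [g ++ [a]]) ++ [[y]] = (gs ++ [g ++ [a]]) ++ [([] : List Int) ++ [y]] by simp]
      rw [ih y (gs ++ [g ++ [a]]) []]
      rw [hstep, hB]
      simp [bstep, hc]

theorem A_eq_brun (numbers : List Int) (proximity : Int) :
    group_numbers numbers proximity = brun proximity numbers := by
  cases numbers with
  | nil => rfl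
  | cons x rest =>
    show groupA_loop proximity rest [[x]] = _
    obtain ⟨g', t, hB⟩ := brun_head proximity x rest
    rw [hB]
    have h := loopA_eq proximity rest x [] []
    rw [hB] at h
    simpa using h

-- ---- B's loop equals brun ----
-- State invariant for B: after consuming l (right to left) the state is
-- (finished groups, reversed, in discovery order; current group reversed).
theorem loopB_eq (proximity : Int) :
    ∀ (l : List Int) (g : List Int) (t : List (List Int)),
      brun proximity l = g :: t →
      l.foldr (fun x st => groupB_step proximity st x) ([], []) = (t.reverse, g.reverse) := by
  intro l
  induction l with
  | nil => intro g t h; simp [brun] at h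
  | cons x l ih =>
    intro g t h
    cases l with
    | nil =>
      simp [brun, bstep] at h
      obtain ⟨h1, h2⟩ := h
      subst h2
      simp [← h1, groupB_step]
    | cons y l' =>
      obtain ⟨g'', t'', hB⟩ := brun_head proximity y l'
      have hfold : (x :: y :: l').foldr (fun x st => groupB_step proximity st x) ([], [])
          = groupB_step proximity ((y :: l').foldr (fun x st => groupB_step proximity st x) ([], [])) x := rfl
      rw [hfold, ih _ _ hB]
      have hbx : brun proximity (x :: y :: l') = bstep proximity x ((y :: g'') :: t'') := by
        rw [show brun proximity (x :: y :: l') = bstep proximity x (brun proximity (y :: l')) from rfl, hB]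
      by_cases hc : y ≤ x + proximity
      · have hgt : g = x :: y :: g'' ∧ t = t'' := by
          rw [h] at hbx
          simp [bstep, hc] at hbx
          exact ⟨hbx.1, hbx.2⟩
        rw [hgt.1, hgt.2]
        simp [groupB_step, hc]
      · have hgt : g = [x] ∧ t = (y :: g'') :: t'' := by
          rw [h] at hbx
          simp [bstep, hc] at hbx
          exact ⟨hbx.1, hbx.2⟩
        rw [hgt.1, hgt.2]
        simp [groupB_step, hc]

theorem B_eq_brun (numbers : List Int) (proximity : Int) :
    group_numbers_alt numbers proximity = brun proximity numbers := by
  cases numbers with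
  | nil => rfl
  | cons x rest =>
    obtain ⟨g', t, hB⟩ := brun_head proximity x rest
    unfold group_numbers_alt
    rw [List.foldl_reverse, loopB_eq proximity (x :: rest) _ _ hB, hB]
    simp

-- ===== VERDICT (by name: the statement is the Claim_ definition above) =====
theorem group_numbers_spec : Claim_equal_group_numbers := by
  intro numbers proximity _
  unfold Spec_group_numbers
  rw [A_eq_brun, B_eq_brun]
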